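-- pv_equiv track=rewrite | github.com/tomasnyberg/cp_notebook | codeforces/1300/1304C.py | check_same_time_bad
-- ===== SOURCE A (Python) =====
-- def check_same_time_bad(customers):
--     i = 0
--     while i < len(customers):
--         arrive, low, high = customers[i]
--         i += 1
--         while i < len(customers) and customers[i][0] == arrive:
--             _, low_b, high_b = customers[i]
--             if low_b > high or high_b < low:
--                 return True
--             low = max(low, low_b)
--             high = min(high, high_b)
--             i += 1
--     return False
-- ===== SOURCE B (Python) =====
-- def _sweep(group):
--     # running max of lows seen so far; conflict if it beats a later high
--     m = None
--     for _, low, high in group: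
--         if m is not None and m > high:
--             return True
--         m = low if m is None else max(m, low)
--     return False
--
--
-- def check_same_time_bad(customers):
--     rest = customers
--     while rest:
--         k = 1
--         while k < len(rest) and rest[k][0] == rest[0][0]:
--             k += 1
--         group, rest = rest[:k], rest[k:]
--         # conflict in a group iff some low (of one member) exceeds some other
--         # member's high; detect it with one forward and one backward sweep
--         if _sweep(group) or _sweep(list(reversed(group))):
--             return True
--     return False
-- ===== Notes on version B (the rewrite author's own statement) =====
-- stated objective: alternative
-- what changed: A keeps a running interval intersection (max of lows, min of highs) with an early return inside one index-driven nested while; B first splits the list into consecutive same-arrival groups and then, per group, detects a conflicting pair by two independent sweeps (forward and backward) that each maintain only a running maximum of lows and compare it against each member's high.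
import Mathlib
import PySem

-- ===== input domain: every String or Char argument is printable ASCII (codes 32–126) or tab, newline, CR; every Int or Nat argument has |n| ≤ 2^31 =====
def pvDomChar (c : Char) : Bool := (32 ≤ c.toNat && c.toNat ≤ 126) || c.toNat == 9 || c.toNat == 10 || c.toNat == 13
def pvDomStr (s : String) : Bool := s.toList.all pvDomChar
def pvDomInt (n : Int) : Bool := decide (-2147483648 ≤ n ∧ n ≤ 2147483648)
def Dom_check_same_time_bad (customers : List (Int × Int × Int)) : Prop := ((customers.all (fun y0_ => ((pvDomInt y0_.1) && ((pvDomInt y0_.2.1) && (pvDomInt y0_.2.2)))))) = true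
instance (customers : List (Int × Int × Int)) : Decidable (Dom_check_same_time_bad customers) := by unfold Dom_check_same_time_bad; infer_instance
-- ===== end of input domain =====

-- B replaces A's single index-driven nested while (running interval intersection
-- with early return) by an explicit split into consecutive same-arrival groups and,
-- per group, two running-max-of-lows sweeps (forward and backward); alternative
-- decomposition, same return value on every input.

-- ===== PORT A =====
-- A's outer while loop (index i at a group boundary) and inner while loop (index i
-- inside a group, carrying the running low/high) are ported as the obvious mutual
-- structural recursion over the remaining list (the suffix customers[i:]).
mutual
def pvAOuter : List (Int × Int × Int) → Bool
  | [] => false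
  | (arrive, low, high) :: rest => pvAInner arrive low high rest
termination_by cs => 2 * cs.length
decreasing_by simp only [List.length_cons]; omega

def pvAInner (arrive low high : Int) : List (Int × Int × Int) → Bool
  | [] => false
  | (a2, low_b, high_b) :: t =>
    if a2 == arrive then
      if low_b > high || high_b < low then true
      else pvAInner arrive (max low low_b) (min high high_b) t
    else pvAOuter ((a2, low_b, high_b) :: t)
termination_by cs => 2 * cs.length + 1
decreasing_by all_goals simp only [List.length_cons]; omega
end

def check_same_time_bad (customers : List (Int × Int × Int)) : Bool :=
  pvAOuter customers

-- ===== PORT B =====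
-- port of Source B's _sweep: running max of lows (None → Option), conflict when it
-- beats a later member's high
def pvSweep : Option Int → List (Int × Int × Int) → Bool
  | _, [] => false
  | m, (_, low, high) :: t =>
    if (match m with | some v => decide (v > high) | none => false) then true
    else pvSweep (some (match m with | some v => max v low | none => low)) t

-- port of Source B's outer while loop: split off the maximal consecutive group with
-- the first element's arrival time (Python's index scan + slicing = takeWhile/dropWhile)
def check_same_time_bad_alt (customers : List (Int × Int × Int)) : Bool :=
  match customers with
  | [] => false
  | c :: rest' =>
    let g := c :: rest'.takeWhile (fun x => x.1 == c.1)
    if pvSweep none g || pvSweep none g.reverse then true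
    else check_same_time_bad_alt (rest'.dropWhile (fun x => x.1 == c.1))
termination_by customers.length
decreasing_by
  simp only [List.length_cons]
  have := List.length_dropWhile_le (fun (x : Int × Int × Int) => x.1 == c.1) rest'
  omega

-- ===== PRECONDITION & SPEC =====
def Spec_check_same_time_bad (customers : List (Int × Int × Int)) (out : Bool) : Prop := out = check_same_time_bad_alt customers
instance (customers : List (Int × Int × Int)) (out : Bool) : Decidable (Spec_check_same_time_bad customers out) := by unfold Spec_check_same_time_bad; infer_instance

-- ===== CLAIM (what is proved, stated in full; the proofs are below) =====
def Claim_equal_check_same_time_bad : Prop := ∀ (customers : List (Int × Int × Int)), Dom_check_same_time_bad customers → Spec_check_same_time_bad customers (check_same_time_bad customers)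

-- ===== LEMMAS AND PROOFS =====

-- element access helpers for the characterizations
def pvLow (g : List (Int × Int × Int)) (i : Nat) : Int := (g.getD i (0, 0, 0)).2.1
def pvHigh (g : List (Int × Int × Int)) (i : Nat) : Int := (g.getD i (0, 0, 0)).2.2

-- A-shaped run over one group's tail, with the running interval (low, high)
def pvRun (low high : Int) : List (Int × Int × Int) → Bool
  | [] => false
  | (_, low_b, high_b) :: t =>
    if low_b > high || high_b < low then true
    else pvRun (max low low_b) (min high high_b) t

-- characterization of pvRun: some later element conflicts with the initial
-- interval or with an earlier element of the group tail
def pvR (low high : Int) (g : List (Int × Int × Int)) : Prop :=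
  ∃ j, j < g.length ∧
    ((pvLow g j > high ∨ pvHigh g j < low) ∨
     ∃ i, i < j ∧ (pvLow g j > pvHigh g i ∨ pvHigh g j < pvLow g i))

-- characterization of pvSweep with accumulator m
def pvS (m : Option Int) (g : List (Int × Int × Int)) : Prop :=
  ∃ j, j < g.length ∧
    ((∃ v, m = some v ∧ v > pvHigh g j) ∨
     ∃ i, i < j ∧ pvLow g i > pvHigh g j)

-- the symmetric pair predicate: some member's low exceeds another member's high
def pvQ (g : List (Int × Int × Int)) : Prop :=
  ∃ i j, i < g.length ∧ j < g.length ∧ i ≠ j ∧ pvLow g i > pvHigh g j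

theorem pvRun_iff (g : List (Int × Int × Int)) : ∀ (low high : Int),
    pvRun low high g = true ↔ pvR low high g := by
  induction g with
  | nil => intro low high; simp [pvRun, pvR]
  | cons x t ih =>
    intro low high
    obtain ⟨a, lb, hb⟩ := x
    rw [pvRun]
    by_cases htr : (lb > high || hb < low) = true
    · rw [if_pos htr]
      simp only [Bool.or_eq_true, decide_eq_true_eq] at htr
      constructor
      · intro _
        exact ⟨0, by simp, Or.inl (by simpa [pvLow, pvHigh] using htr)⟩
      · intro _; rfl
    · rw [if_neg htr, ih]
      simp only [Bool.or_eq_true, decide_eq_true_eq, not_or, not_lt] at htr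
      constructor
      · rintro ⟨j, hj, hcond⟩
        refine ⟨j + 1, by simpa using hj, ?_⟩
        rcases hcond with h1 | ⟨i, hi, h2⟩
        · rcases h1 with h | h
          · by_cases hc : high < hb
            · refine Or.inl (Or.inl ?_)
              simp only [pvLow, pvHigh, List.getD_cons_succ] at h ⊢; omega
            · refine Or.inr ⟨0, by omega, Or.inl ?_⟩
              simp only [pvLow, pvHigh, List.getD_cons_zero, List.getD_cons_succ] at h ⊢; omega
          · by_cases hc : lb < low
            · refine Or.inl (Or.inr ?_)
              simp only [pvLow, pvHigh, List.getD_cons_succ] at h ⊢; omega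
            · refine Or.inr ⟨0, by omega, Or.inr ?_⟩
              simp only [pvLow, pvHigh, List.getD_cons_zero, List.getD_cons_succ] at h ⊢; omega
        · refine Or.inr ⟨i + 1, by omega, ?_⟩
          simp only [pvLow, pvHigh, List.getD_cons_succ] at h2 ⊢; exact h2
      · rintro ⟨j, hj, hcond⟩
        rcases j with _ | j'
        · simp only [pvLow, pvHigh, List.getD_cons_zero] at hcond
          rcases hcond with h | ⟨i, hi, _⟩
          · omega
          · omega
        · refine ⟨j', by simpa using hj, ?_⟩
          rcases hcond with h1 | ⟨i, hi, h2⟩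
          · rcases h1 with h | h
            · exact Or.inl (Or.inl (by simp only [pvLow, List.getD_cons_succ] at h ⊢; omega))
            · exact Or.inl (Or.inr (by simp only [pvHigh, List.getD_cons_succ] at h ⊢; omega))
          · rcases i with _ | i'
            · simp only [pvLow, pvHigh, List.getD_cons_zero, List.getD_cons_succ] at h2
              rcases h2 with h | h
              · exact Or.inl (Or.inl (by simp only [pvLow, pvHigh, List.getD_cons_succ]; omega))
              · exact Or.inl (Or.inr (by simp only [pvLow, pvHigh, List.getD_cons_succ]; omega))
            · exact Or.inr ⟨i', by omega, by simpa [pvLow, pvHigh] using h2⟩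

theorem pvSweep_iff (g : List (Int × Int × Int)) : ∀ (m : Option Int),
    pvSweep m g = true ↔ pvS m g := by
  induction g with
  | nil => intro m; simp [pvSweep, pvS]
  | cons x t ih =>
    intro m
    obtain ⟨a, lb, hb⟩ := x
    simp only [pvSweep]
    by_cases htr : (match m with | some v => decide (v > hb) | none => false) = true
    · rw [if_pos htr]
      constructor
      · intro _
        rcases m with _ | v
        · simp at htr
        · simp only [decide_eq_true_eq] at htr
          exact ⟨0, by simp, Or.inl ⟨v, rfl, by simpa [pvHigh] using htr⟩⟩
      · intro _; rfl
    · rw [if_neg htr, ih]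
      constructor
      · rintro ⟨j, hj, hcond⟩
        refine ⟨j + 1, by simpa using hj, ?_⟩
        rcases hcond with ⟨v, hv, hgt⟩ | ⟨i, hi, h2⟩
        · rcases m with _ | w
          · simp only [Option.some.injEq] at hv
            subst hv
            exact Or.inr ⟨0, by omega, by simpa [pvLow, pvHigh] using hgt⟩
          · simp only [Option.some.injEq] at hv
            subst hv
            by_cases hc : w ≤ lb
            · exact Or.inr ⟨0, by omega, by simp only [pvLow, pvHigh, List.getD_cons_zero, List.getD_cons_succ] at hgt ⊢; omega⟩
            · exact Or.inl ⟨w, rfl, by simp only [pvHigh, List.getD_cons_succ] at hgt ⊢; omega⟩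
        · exact Or.inr ⟨i + 1, by omega, by simpa [pvLow, pvHigh] using h2⟩
      · rintro ⟨j, hj, hcond⟩
        rcases j with _ | j'
        · rcases hcond with ⟨v, hv, hgt⟩ | ⟨i, hi, _⟩
          · exfalso; subst hv
            simp only [pvHigh, List.getD_cons_zero] at hgt
            simp only [decide_eq_true_eq] at htr
            exact htr (by omega)
          · omega
        · refine ⟨j', by simpa using hj, ?_⟩
          rcases hcond with ⟨v, hv, hgt⟩ | ⟨i, hi, h2⟩
          · subst hv
            exact Or.inl ⟨max v lb, rfl, by simp only [pvHigh, List.getD_cons_succ] at hgt ⊢; omega⟩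
          · rcases i with _ | i'
            · simp only [pvLow, pvHigh, List.getD_cons_zero, List.getD_cons_succ] at h2
              rcases m with _ | w
              · exact Or.inl ⟨lb, rfl, by simpa [pvHigh] using h2⟩
              · exact Or.inl ⟨max w lb, rfl, by simp only [pvHigh, List.getD_cons_succ]; omega⟩
            · exact Or.inr ⟨i', by omega, by simpa [pvLow, pvHigh] using h2⟩

theorem pvGetD_reverse (g : List (Int × Int × Int)) (i : Nat) (hi : i < g.length) :
    g.reverse.getD i (0,0,0) = g.getD (g.length - 1 - i) (0,0,0) := by
  rw [List.getD_eq_getElem _ _ (by simpa using hi),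
      List.getD_eq_getElem _ _ (by omega), List.getElem_reverse]

theorem pvS_none_reverse (g : List (Int × Int × Int)) :
    pvS none g.reverse ↔ ∃ i j, i < g.length ∧ j < g.length ∧ j < i ∧ pvLow g i > pvHigh g j := by
  unfold pvS
  constructor
  · rintro ⟨j, hj, hcond⟩
    rcases hcond with ⟨v, hv, _⟩ | ⟨i, hi, h2⟩
    · exact absurd hv (by simp)
    · rw [List.length_reverse] at hj
      have hi' : i < g.length := by omega
      refine ⟨g.length - 1 - i, g.length - 1 - j, by omega, by omega, by omega, ?_⟩
      simp only [pvLow, pvHigh] at h2 ⊢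
      rw [pvGetD_reverse _ _ (by simpa using hi'), pvGetD_reverse _ _ (by simpa using hj)] at h2
      exact h2
  · rintro ⟨i, j, hi, hj, hij, h⟩
    refine ⟨g.length - 1 - j, by simp only [List.length_reverse]; omega,
      Or.inr ⟨g.length - 1 - i, by omega, ?_⟩⟩
    simp only [pvLow, pvHigh] at h ⊢
    rw [pvGetD_reverse _ _ (by omega), pvGetD_reverse _ _ (by omega)]
    have e1 : g.length - 1 - (g.length - 1 - j) = j := by omega
    have e2 : g.length - 1 - (g.length - 1 - i) = i := by omega
    rw [e1, e2]; exact h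

theorem pvQ_iff_sweeps (g : List (Int × Int × Int)) :
    (pvSweep none g || pvSweep none g.reverse) = true ↔ pvQ g := by
  rw [Bool.or_eq_true, pvSweep_iff, pvSweep_iff, pvS_none_reverse]
  unfold pvS pvQ
  constructor
  · rintro (⟨j, hj, hcond⟩ | ⟨i, j, hi, hj, hij, h⟩)
    · rcases hcond with ⟨v, hv, _⟩ | ⟨i, hi, h2⟩
      · exact absurd hv (by simp)
      · exact ⟨i, j, by omega, hj, by omega, h2⟩
    · exact ⟨i, j, hi, hj, by omega, h⟩
  · rintro ⟨i, j, hi, hj, hij, h⟩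
    rcases Nat.lt_or_ge i j with hlt | hge
    · exact Or.inl ⟨j, hj, Or.inr ⟨i, hlt, h⟩⟩
    · exact Or.inr ⟨i, j, hi, hj, by omega, h⟩

theorem pvR_iff_pvQ (a low high : Int) (g : List (Int × Int × Int)) :
    pvR low high g ↔ pvQ ((a, low, high) :: g) := by
  unfold pvR pvQ
  constructor
  · rintro ⟨j, hj, hcond⟩
    rcases hcond with h1 | ⟨i, hi, h2⟩
    · rcases h1 with h | h
      · exact ⟨j + 1, 0, by simpa using hj, by simp, by omega, by simpa [pvLow, pvHigh] using h⟩
      · exact ⟨0, j + 1, by simp, by simpa using hj, by omega, by simpa [pvLow, pvHigh] using h⟩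
    · rcases h2 with h | h
      · exact ⟨j + 1, i + 1, by simpa using hj, by simp; omega, by omega, by simpa [pvLow, pvHigh] using h⟩
      · exact ⟨i + 1, j + 1, by simp; omega, by simpa using hj, by omega, by simpa [pvLow, pvHigh] using h⟩
  · rintro ⟨i, j, hi, hj, hij, h⟩
    match i, j with
    | 0, 0 => omega
    | 0, j' + 1 =>
      exact ⟨j', by simpa using hj, Or.inl (Or.inr (by simpa [pvLow, pvHigh] using h))⟩
    | i' + 1, 0 =>
      exact ⟨i', by simpa using hi, Or.inl (Or.inl (by simpa [pvLow, pvHigh] using h))⟩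
    | i' + 1, j' + 1 =>
      rcases Nat.lt_or_ge i' j' with hlt | hge
      · exact ⟨j', by simpa using hj, Or.inr ⟨i', hlt, Or.inr (by simpa [pvLow, pvHigh] using h)⟩⟩
      · exact ⟨i', by simpa using hi, Or.inr ⟨j', by omega, Or.inl (by simpa [pvLow, pvHigh] using h)⟩⟩

-- one group's run (A-shape) equals the two sweeps (B-shape)
theorem pvRun_eq_sweeps (a low high : Int) (g : List (Int × Int × Int)) :
    pvRun low high g =
      (pvSweep none ((a, low, high) :: g) || pvSweep none ((a, low, high) :: g).reverse) := by
  have h : pvRun low high g = true ↔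
      (pvSweep none ((a, low, high) :: g) || pvSweep none ((a, low, high) :: g).reverse) = true := by
    rw [pvRun_iff, pvQ_iff_sweeps]
    exact pvR_iff_pvQ a low high g
  exact Bool.eq_iff_iff.mpr h

-- A's inner loop on any suffix = the A-shaped run on the matching prefix, then
-- the outer loop on the remainder
theorem pvAInner_split (a : Int) (cs : List (Int × Int × Int)) : ∀ (low high : Int),
    pvAInner a low high cs =
      (pvRun low high (cs.takeWhile (fun x => x.1 == a)) ||
        pvAOuter (cs.dropWhile (fun x => x.1 == a))) := by
  induction cs with
  | nil => intro low high; simp [pvAInner, pvRun, pvAOuter]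
  | cons x t ih =>
    intro low high
    obtain ⟨a2, lb, hb⟩ := x
    by_cases hm : a2 == a
    · rw [pvAInner, if_pos hm, List.takeWhile_cons_of_pos (by simpa using hm),
          List.dropWhile_cons_of_pos (by simpa using hm)]
      by_cases htr : (lb > high || hb < low) = true
      · rw [if_pos htr, pvRun, if_pos htr]; simp
      · rw [if_neg htr, pvRun, if_neg htr, ih]
    · rw [pvAInner, if_neg hm, List.takeWhile_cons_of_neg (by simpa using hm),
          List.dropWhile_cons_of_neg (by simpa using hm)]
      simp [pvRun]

theorem pvAOuter_eq_alt (cs : List (Int × Int × Int)) :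
    pvAOuter cs = check_same_time_bad_alt cs := by
  induction hn : cs.length using Nat.strong_induction_on generalizing cs with
  | _ n ih =>
  match cs with
  | [] => simp [pvAOuter, check_same_time_bad_alt]
  | (a, low, high) :: rest =>
    rw [pvAOuter, pvAInner_split, check_same_time_bad_alt]
    simp only []
    rw [← pvRun_eq_sweeps a low high (rest.takeWhile (fun x => x.1 == a))]
    have hd := List.length_dropWhile_le (fun (x : Int × Int × Int) => x.1 == a) rest
    have hrec : pvAOuter (rest.dropWhile (fun x => x.1 == a)) =
        check_same_time_bad_alt (rest.dropWhile (fun x => x.1 == a)) := by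
      subst hn
      exact ih _ (by simp only [List.length_cons]; omega) _ rfl
    by_cases hrun : pvRun low high (rest.takeWhile (fun x => x.1 == a)) = true
    · rw [hrun]; simp
    · rw [Bool.not_eq_true] at hrun
      rw [hrun, hrec]
      simp

-- ===== VERDICT (by name: the statement is the Claim_ definition above) =====
theorem check_same_time_bad_spec : Claim_equal_check_same_time_bad := by
  intro customers _
  unfold Spec_check_same_time_bad check_same_time_bad
  exact pvAOuter_eq_alt customers
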